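-- pv_equiv track=rewrite | github.com/Dexter626358/simple-article-tagger | word_reader.py | merge_doi_url_lines
-- ===== SOURCE A (Python) =====
-- from typing import Iterable, List, Optional, Sequence, Union, Literal
--
-- def merge_doi_url_lines(lines: List[str]) -> List[str]:
--     """
--     Объединяет строки с DOI/URL с предыдущими строками.
--
--     Если строка начинается с http и содержит doi.org, она объединяется
--     с предыдущей строкой через пробел.
--
--     Args:
--         lines: Список строк
--
--     Returns:
--         Обработанный список, где DOI/URL прикреплены к предыдущим строкам
--
--     Examples:
--         >>> lines = [
--         ...     "Polyanin A.D., Manzhirov A.V. Handbook...",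
--         ...     "https://doi.org/10.1201/9781420010558"
--         ... ]
--         >>> merge_doi_url_lines(lines)
--         ['Polyanin A.D., Manzhirov A.V. Handbook... https://doi.org/10.1201/9781420010558']
--     """
--     if not lines:
--         return []
--
--     result = []
--
--     for line in lines:
--         line_stripped = line.strip()
--         if not line_stripped:
--             continue
--
--         # Проверяем, является ли строка DOI/URL
--         # Варианты: https://doi.org/, http://doi.org/, http://dx.doi.org/
--         line_lower = line_stripped.lower()
--         is_doi_url = (
--             line_stripped.startswith("http") and
--             ("doi.org" in line_lower or "dx.doi.org" in line_lower)
--         )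
--
--         # Если это DOI/URL и есть предыдущая строка, объединяем
--         if is_doi_url and result:
--             result[-1] = result[-1] + " " + line_stripped
--         else:
--             result.append(line_stripped)
--
--     return result
-- ===== SOURCE B (Python) =====
-- def merge_doi_url_lines(lines):
--     # Phase 1: clean (strip and drop blanks)
--     cleaned = [s for s in (line.strip() for line in lines) if s]
--     # Phase 2: group — each group is a base line followed by its DOI/URL lines
--     groups = []
--     for s in cleaned:
--         if groups and s.startswith("http") and "doi.org" in s.lower():
--             groups[-1].append(s)
--         else:
--             groups.append([s])
--     # Phase 3: join each group with spaces
--     return [" ".join(g) for g in groups]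
-- ===== Notes on version B (the rewrite author's own statement) =====
-- stated objective: simpler
-- what changed: Replaces A's single loop that strips, tests and mutates result[-1] by string concatenation with a three-phase pipeline (clean, group into lists, join each group with ' '), with the redundant 'dx.doi.org' disjunct dropped.
import Mathlib
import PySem

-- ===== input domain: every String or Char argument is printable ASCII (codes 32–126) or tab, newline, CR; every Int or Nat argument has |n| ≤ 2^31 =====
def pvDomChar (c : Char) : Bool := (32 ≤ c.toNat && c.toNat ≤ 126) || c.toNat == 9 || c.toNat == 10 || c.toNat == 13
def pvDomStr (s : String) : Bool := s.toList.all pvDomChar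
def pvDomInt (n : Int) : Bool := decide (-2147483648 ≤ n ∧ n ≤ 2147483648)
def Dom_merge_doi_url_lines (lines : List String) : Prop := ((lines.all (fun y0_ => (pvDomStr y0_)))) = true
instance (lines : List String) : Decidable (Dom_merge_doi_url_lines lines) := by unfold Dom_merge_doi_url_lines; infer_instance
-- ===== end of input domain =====

-- B replaces A's single loop mutating result[-1] by a clean/group/join pipeline (objective: simpler); return values proved equal.

-- ===== PORT A =====
-- body of A's loop for a non-blank stripped line
def pvStepA' (res : List String) (st : String) : List String :=
  let lw := PySem.Str.lower st
  let isDoi := PySem.Str.startswith st "http" &&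
    (PySem.Str.isIn "doi.org" lw || PySem.Str.isIn "dx.doi.org" lw)
  if isDoi && !res.isEmpty then
    res.dropLast ++ [res.getLast! ++ " " ++ st]
  else
    res ++ [st]

-- one iteration of A's loop: strip, skip blanks, then the body above
def pvStepA (res : List String) (line : String) : List String :=
  let st := PySem.Str.strip line
  if st = "" then res else pvStepA' res st

def merge_doi_url_lines (lines : List String) : List String :=
  if lines = [] then [] else lines.foldl pvStepA []

-- ===== PORT B =====
def pvIsDoiB (s : String) : Bool :=
  PySem.Str.startswith s "http" && PySem.Str.isIn "doi.org" (PySem.Str.lower s)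

def pvStepB (groups : List (List String)) (s : String) : List (List String) :=
  if !groups.isEmpty && pvIsDoiB s then
    groups.dropLast ++ [groups.getLast! ++ [s]]
  else
    groups ++ [[s]]

def merge_doi_url_lines_alt (lines : List String) : List String :=
  let cleaned := (lines.map PySem.Str.strip).filter (fun s => s ≠ "")
  ((cleaned.foldl pvStepB []).map (fun g => PySem.Str.join " " g))

-- ===== PRECONDITION & SPEC =====
def Spec_merge_doi_url_lines (lines : List String) (out : List String) : Prop := out = merge_doi_url_lines_alt lines
instance (lines : List String) (out : List String) : Decidable (Spec_merge_doi_url_lines lines out) := by unfold Spec_merge_doi_url_lines; infer_instance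

-- ===== CLAIM (what is proved, stated in full; the proofs are below) =====
def Claim_equal_merge_doi_url_lines : Prop := ∀ (lines : List String), Dom_merge_doi_url_lines lines → Spec_merge_doi_url_lines lines (merge_doi_url_lines lines)

-- ===== LEMMAS AND PROOFS =====

-- the "dx.doi.org" disjunct in A is redundant: it contains "doi.org"
lemma pv_disj_collapse (l : String) :
    (PySem.Str.isIn "doi.org" l || PySem.Str.isIn "dx.doi.org" l) = PySem.Str.isIn "doi.org" l := by
  cases h : PySem.Str.isIn "dx.doi.org" l with
  | false => simp
  | true =>
    have h1 : ("dx.doi.org" : String).toList <:+: l.toList := (PySem.Str.isIn_iff_infix _ _).mp h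
    have h2 : ("doi.org" : String).toList <:+: ("dx.doi.org" : String).toList := by decide
    have h3 : PySem.Str.isIn "doi.org" l = true := (PySem.Str.isIn_iff_infix _ _).mpr (h2.trans h1)
    rw [Bool.or_true, h3]

def pvJoinSp (g : List String) : String := PySem.Str.join " " g

lemma pv_toList_inj {s t : String} (h : s.toList = t.toList) : s = t := by
  have := congrArg String.ofList h
  simpa using this

lemma pv_join_singleton (s : String) : pvJoinSp [s] = s := by
  apply pv_toList_inj
  simp [pvJoinSp, PySem.Str.join, PySem.Chars.join, List.intercalate]

lemma pv_join_append (g : List String) (hg : g ≠ []) (s : String) :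
    pvJoinSp (g ++ [s]) = pvJoinSp g ++ " " ++ s := by
  apply pv_toList_inj
  induction g with
  | nil => exact absurd rfl hg
  | cons a t ih =>
    cases t with
    | nil => simp [pvJoinSp, PySem.Str.join, PySem.Chars.join, List.intercalate]
    | cons b u =>
      have := ih (by simp)
      simp [pvJoinSp, PySem.Str.join, PySem.Chars.join, List.intercalate] at this ⊢
      simp [this]

-- A's fold over the raw lines equals the body-fold over the cleaned list
lemma pv_foldA_clean (lines : List String) (r : List String) :
    lines.foldl pvStepA r
      = ((lines.map PySem.Str.strip).filter (fun s => s ≠ "")).foldl pvStepA' r := by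
  induction lines generalizing r with
  | nil => rfl
  | cons a t ih =>
    by_cases h : PySem.Str.strip a = "" <;>
      simp [pvStepA, h, ih]

lemma pv_getLast!_eq {α : Type} [Inhabited α] (l : List α) (h : l ≠ []) :
    l.getLast! = l.getLast h := by
  cases l with
  | nil => exact absurd rfl h
  | cons a t => rfl

lemma pv_getLast!_mem {α : Type} [Inhabited α] (l : List α) (h : l ≠ []) :
    l.getLast! ∈ l := by
  rw [pv_getLast!_eq l h]; exact List.getLast_mem h

lemma pv_getLast!_map (f : List String → String) (l : List (List String)) (h : l ≠ []) :
    (l.map f).getLast! = f l.getLast! := by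
  have hm : l.map f ≠ [] := by simp [h]
  rw [pv_getLast!_eq _ h, pv_getLast!_eq _ hm, List.getLast_map]

-- main invariant: A's body-fold over strings mirrors B's group fold through pvJoinSp
lemma pv_invariant (cl : List String) (groups : List (List String))
    (hne : ∀ g ∈ groups, g ≠ []) :
    cl.foldl pvStepA' (groups.map pvJoinSp) = (cl.foldl pvStepB groups).map pvJoinSp := by
  induction cl generalizing groups with
  | nil => rfl
  | cons s t ih =>
    simp only [List.foldl_cons]
    have hcond : (PySem.Str.startswith s "http" &&
        (PySem.Str.isIn "doi.org" (PySem.Str.lower s) || PySem.Str.isIn "dx.doi.org" (PySem.Str.lower s))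
        && !(groups.map pvJoinSp).isEmpty)
        = (!groups.isEmpty && pvIsDoiB s) := by
      rw [pv_disj_collapse]
      cases groups <;> simp [pvIsDoiB, Bool.and_comm]
    by_cases hb : (!groups.isEmpty && pvIsDoiB s) = true
    · have hgne : groups ≠ [] := by
        cases groups <;> simp_all
      have hstep : pvStepA' (groups.map pvJoinSp) s
          = (groups.dropLast ++ [groups.getLast! ++ [s]]).map pvJoinSp := by
        simp only [pvStepA']
        rw [hcond, hb, if_pos rfl]
        simp only [List.map_append, List.map_dropLast, List.map_cons, List.map_nil]
        rw [pv_getLast!_map _ _ hgne,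
            pv_join_append _ (hne _ (pv_getLast!_mem _ hgne)) s]
      rw [hstep, ih]
      · simp [pvStepB, hb]
      · intro g hg
        rcases List.mem_append.mp hg with h1 | h1
        · exact hne _ (List.dropLast_subset _ h1)
        · simp at h1; simp [h1]
    · have hstep : pvStepA' (groups.map pvJoinSp) s
          = (groups ++ [[s]]).map pvJoinSp := by
        simp only [pvStepA']
        rw [hcond]
        simp [hb, pv_join_singleton]
      rw [hstep, ih]
      · simp [pvStepB, hb]
      · intro g hg
        rcases List.mem_append.mp hg with h1 | h1
        · exact hne _ h1
        · simp at h1; simp [h1]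

-- ===== VERDICT (by name: the statement is the Claim_ definition above) =====
theorem merge_doi_url_lines_spec : Claim_equal_merge_doi_url_lines := by
  intro lines _
  show merge_doi_url_lines lines = merge_doi_url_lines_alt lines
  unfold merge_doi_url_lines merge_doi_url_lines_alt
  by_cases h : lines = []
  · simp [h]
  · rw [if_neg h, pv_foldA_clean]
    have := pv_invariant ((lines.map PySem.Str.strip).filter (fun s => s ≠ "")) [] (by simp)
    simpa using this
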